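-- pv_equiv track=rewrite | github.com/hyeok-kong/Algorithms | 프로그래머스/1/135808. 과일 장수/과일 장수.py | solution
-- ===== SOURCE A (Python) =====
-- import queue
--
-- def solution(k, m, score):
--     answer = 0
--     q = queue.Queue()
--     sorted_score = sorted(score, reverse=True)
--
--     for i in range(len(score)):
--         q.put(sorted_score[i])
--
--     for i in range(len(score)//m):
--         for j in range(m):
--             j = q.get()
--         answer += j*m
--     return answer
-- ===== SOURCE B (Python) =====
-- def solution(k, m, score):
--     # Simpler: the minimum of each full descending-sorted box of size m sits at
--     # indices m-1, 2m-1, ...; sum them with a stride instead of draining a queue.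
--     s = sorted(score, reverse=True)
--     return m * sum(s[i] for i in range(m - 1, (len(score) // m) * m, m))
-- ===== Notes on version B (the rewrite author's own statement) =====
-- stated objective: simpler
-- what changed: Replaces the queue plus nested per-element draining loop with a single strided sum over the sorted list (the minimum of each full box lies at indices m-1, 2m-1, ...).
import Mathlib
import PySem

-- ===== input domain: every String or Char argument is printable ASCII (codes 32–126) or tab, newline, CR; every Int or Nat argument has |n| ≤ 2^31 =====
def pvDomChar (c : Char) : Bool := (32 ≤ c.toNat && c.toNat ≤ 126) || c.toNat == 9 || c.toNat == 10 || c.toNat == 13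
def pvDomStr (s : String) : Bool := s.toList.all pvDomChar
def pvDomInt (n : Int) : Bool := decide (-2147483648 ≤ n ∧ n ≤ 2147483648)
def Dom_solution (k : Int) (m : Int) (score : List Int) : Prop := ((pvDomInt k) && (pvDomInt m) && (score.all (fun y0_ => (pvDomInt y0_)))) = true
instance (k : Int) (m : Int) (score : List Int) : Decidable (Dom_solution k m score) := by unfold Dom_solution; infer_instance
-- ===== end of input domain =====

-- B replaces A's queue and nested draining loop with a single strided sum over
-- the sorted list (objective: simpler; equal asymptotic cost).


-- ===== PORT A =====
-- queue.Queue is modeled as a FIFO list; q.get() is (headD 0, tail) — under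
-- Pre_ (m ≠ 0) the drained count (len//m)*m never exceeds the queue length,
-- so the blocking/empty case is never reached and the port is exact.
def solution (k : Int) (m : Int) (score : List Int) : Int :=
  let sorted_score := PySem.List.sorted score (fun x => x) true
  let q := (PySem.List.pyRange 0 score.length 1).foldl
      (fun q i => q ++ [PySem.List.pyGetD sorted_score i 0]) ([] : List Int)
  let st := (PySem.List.pyRange 0 (PySem.Int.floordiv score.length m) 1).foldl
      (fun (st : Int × List Int) _ =>
        let inner := (PySem.List.pyRange 0 m 1).foldl
            (fun (p : Int × List Int) _ => (p.2.headD 0, p.2.tail)) (0, st.2)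
        (st.1 + inner.1 * m, inner.2))
      (0, q)
  st.1

-- ===== PORT B =====
def solution_alt (k : Int) (m : Int) (score : List Int) : Int :=
  let s := PySem.List.sorted score (fun x => x) true
  m * (((PySem.List.pyRange (m - 1) ((PySem.Int.floordiv score.length m) * m) m).map
        (fun i => PySem.List.pyGetD s i 0)).sum)

-- ===== PRECONDITION & SPEC =====
-- Pre_ excludes exactly m = 0, where Python's len(score)//m raises ZeroDivisionError (in A and in B alike).
def Pre_solution (k : Int) (m : Int) (score : List Int) : Prop := m ≠ 0
instance (k : Int) (m : Int) (score : List Int) : Decidable (Pre_solution k m score) := by unfold Pre_solution; infer_instance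
def pvWitness_solution : Int × Int × List Int := (0, 3, [1, 2, 3, 1, 2, 3, 1])

def Spec_solution (k : Int) (m : Int) (score : List Int) (out : Int) : Prop := out = solution_alt k m score
instance (k : Int) (m : Int) (score : List Int) (out : Int) : Decidable (Spec_solution k m score out) := by unfold Spec_solution; infer_instance

-- ===== CLAIM (what is proved, stated in full; the proofs are below) =====
def Claim_equal_solution : Prop := ∀ (k : Int) (m : Int) (score : List Int), Dom_solution k m score → Pre_solution k m score → Spec_solution k m score (solution k m score)

-- ===== LEMMAS AND PROOFS =====

-- a fold that ignores the list elements is an iterate of the step function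
theorem foldl_ignore_eq_iterate {α β : Type} (F : β → β) (l : List α) (init : β) :
    l.foldl (fun st _ => F st) init = F^[l.length] init := by
  induction l generalizing init with
  | nil => rfl
  | cons x xs ih => simp [List.foldl_cons, ih, Function.iterate_succ_apply]

-- draining t+1 elements from a FIFO list
theorem drain_iterate (t : Nat) (j : Int) (q : List Int) :
    (fun (p : Int × List Int) => (p.2.headD 0, p.2.tail))^[t + 1] (j, q)
      = ((q.drop t).headD 0, q.drop (t + 1)) := by
  induction t generalizing j q with
  | zero => simp
  | succ t ih =>
    rw [Function.iterate_succ_apply' (n := t + 1)]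
    rw [ih]
    simp [List.tail_drop]

-- the outer loop: c full boxes, each contributing (box minimum) * m
theorem outer_iterate (m : Int) (mN : Nat) (hm1 : 1 ≤ mN) (c : Nat) :
    ∀ (a : Int) (q : List Int),
    ((fun (st : Int × List Int) =>
        (st.1 + (st.2.drop (mN - 1)).headD 0 * m, st.2.drop mN))^[c] (a, q)).1
      = a + m * ((List.range c).map
          (fun i => ((q.drop (i * mN + mN - 1)).headD 0 : Int))).sum := by
  induction c with
  | zero => intro a q; simp
  | succ c ih =>
    intro a q
    rw [Function.iterate_succ_apply, ih]
    have hmap : List.map (fun i => (((q.drop mN).drop (i * mN + mN - 1)).headD 0 : Int)) (List.range c)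
        = List.map ((fun i => ((q.drop (i * mN + mN - 1)).headD 0 : Int)) ∘ Nat.succ) (List.range c) := by
      apply List.map_congr_left
      intro i _
      simp only [Function.comp_apply]
      congr 1
      rw [List.drop_drop, Nat.succ_mul]
      congr 1
      have h0 : 0 ≤ i * mN := Nat.zero_le _
      generalize i * mN = t
      omega
    rw [List.range_succ_eq_map]
    simp only [List.map_cons, List.map_map, List.sum_cons]
    rw [← hmap]
    have h00 : 0 * mN + mN - 1 = mN - 1 := by omega
    rw [h00]
    ring

-- B's strided range, for m > 0, enumerated
theorem stride_range (m c : Int) (hm : 0 < m) (hc : 0 ≤ c) :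
    PySem.List.pyRange (m - 1) (c * m) m
      = (List.range c.toNat).map (fun k : Nat => (m - 1) + m * (k : Int)) := by
  rw [PySem.List.pyRange_of_pos _ _ hm]
  have hcount : (if m - 1 < c * m then ((c * m - (m - 1) + m - 1) / m).toNat else 0) = c.toNat := by
    by_cases h : m - 1 < c * m
    · rw [if_pos h]
      have hnum : c * m - (m - 1) + m - 1 = c * m := by ring
      rw [hnum, Int.mul_ediv_cancel _ (by omega)]
    · rw [if_neg h]
      have hc0 : c = 0 := by nlinarith
      simp [hc0]
  rw [hcount]

-- floordiv of nonnegative by negative is nonpositive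
theorem fdiv_nonpos_of_nonneg_of_neg (n m : Int) (hn : 0 ≤ n) (hm : m < 0) :
    PySem.Int.floordiv n m ≤ 0 := by
  show n.fdiv m ≤ 0
  rw [Int.fdiv_eq_ediv]
  have h := Int.ediv_nonpos_of_nonneg_of_nonpos hn hm.le
  split <;> omega

-- ===== VERDICT (by name: the statement is the Claim_ definition above) =====
theorem solution_spec : Claim_equal_solution := by
  intro k m score _ hpre
  unfold Spec_solution solution solution_alt
  simp only []
  set s := PySem.List.sorted score (fun x => x) true with hs
  have hlen : (s.length : Int) = (score.length : Int) := by
    simp [hs, PySem.List.length_sorted]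
  -- the queue holds exactly the sorted list
  have hq : (PySem.List.pyRange 0 score.length 1).foldl
      (fun q i => q ++ [PySem.List.pyGetD s i 0]) ([] : List Int) = s := by
    rw [PySem.List.foldl_append_singleton_eq_map]
    rw [List.nil_append]
    rw [show ((score.length : Int)) = ((s.length : Int)) from hlen.symm]
    exact PySem.List.map_pyGetD_pyRange_zero' s 0
  rw [hq]
  set c := PySem.Int.floordiv score.length m with hcdef
  rcases lt_or_gt_of_ne hpre with hneg | hpos
  · -- m < 0 : both sides are 0
    have hc0 : c ≤ 0 := fdiv_nonpos_of_nonneg_of_neg _ _ (by positivity) hneg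
    have hA : PySem.List.pyRange 0 c 1 = [] := PySem.List.pyRange_one_eq_nil hc0
    have hB : PySem.List.pyRange (m - 1) (c * m) m = [] := by
      have hstop : ¬ (c * m < m - 1) := by nlinarith
      simp [PySem.List.pyRange, not_lt_of_gt hneg, hstop]
    rw [hA, hB]
    simp
  · -- m > 0
    obtain ⟨mN, hmN⟩ : ∃ mN : Nat, m = (mN : Int) := ⟨m.toNat, (Int.toNat_of_nonneg hpos.le).symm⟩
    have hmN1 : 1 ≤ mN := by omega
    have hc : 0 ≤ c := Int.fdiv_nonneg (by positivity) hpos.le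
    -- A side: fold = iterate of the per-box step
    have hinnerlen : (PySem.List.pyRange 0 m 1).length = mN := by
      simp [PySem.List.length_pyRange_one, hmN]
    have hinner : ∀ q : List Int,
        (PySem.List.pyRange 0 m 1).foldl
          (fun (p : Int × List Int) _ => (p.2.headD 0, p.2.tail)) (0, q)
          = ((q.drop (mN - 1)).headD 0, q.drop mN) := by
      intro q
      rw [foldl_ignore_eq_iterate, hinnerlen]
      obtain ⟨t, ht⟩ : ∃ t, mN = t + 1 := ⟨mN - 1, by omega⟩
      rw [ht, drain_iterate]
      simp
    have hstep : (fun (st : Int × List Int) _ =>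
        let inner := (PySem.List.pyRange 0 m 1).foldl
            (fun (p : Int × List Int) _ => (p.2.headD 0, p.2.tail)) (0, st.2)
        (st.1 + inner.1 * m, inner.2))
        = (fun (st : Int × List Int) (_ : Int) =>
            (st.1 + (st.2.drop (mN - 1)).headD 0 * m, st.2.drop mN)) := by
      funext st i
      simp only [hinner st.2]
    rw [hstep]
    rw [foldl_ignore_eq_iterate
      (F := fun (st : Int × List Int) =>
        (st.1 + (st.2.drop (mN - 1)).headD 0 * m, st.2.drop mN))]
    have hclen : (PySem.List.pyRange 0 c 1).length = c.toNat := by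
      simp [PySem.List.length_pyRange_one]
    rw [hclen]
    rw [outer_iterate m mN hmN1 c.toNat 0 s]
    -- B side
    rw [stride_range m c hpos hc]
    rw [List.map_map]
    have hmapB : List.map ((fun i => PySem.List.pyGetD s i 0) ∘ fun k : Nat => m - 1 + m * (k : Int)) (List.range c.toNat)
        = List.map (fun i => ((s.drop (i * mN + mN - 1)).headD 0 : Int)) (List.range c.toNat) := by
      apply List.map_congr_left
      intro i _
      simp only [Function.comp_apply]
      rw [PySem.List.pyGetD_of_nonneg s 0
        (by linarith [mul_nonneg hpos.le (Int.natCast_nonneg i)])]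
      have hidx : ((m - 1) + m * (i : Int)).toNat = i * mN + mN - 1 := by
        subst hmN
        rw [Nat.mul_comm i mN]
        have hcast : ((mN : Int)) * ((i : Nat) : Int) = (((mN * i : Nat)) : Int) := by
          push_cast; ring
        rw [hcast]
        omega
      rw [hidx]
      rw [List.getD_eq_getElem?_getD, ← List.head?_drop, List.headD_eq_head?]
    rw [hmapB]
    ring
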